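-- pv_equiv track=rewrite | github.com/GURRALASAIHANEESH/pregnancy-bridge | backend/pregnancy_bridge/modules/history_compare.py | _detect_progressive_hypertension_pattern
-- ===== SOURCE A (Python) =====
-- from typing import List, Dict, Optional
--
-- def _detect_progressive_hypertension_pattern(history: List[Dict[str, any]]) -> Optional[str]:
--     bp_values = [
--         v.get('bp_systolic')
--         for v in history
--         if v.get('bp_systolic') is not None
--     ]
--
--     if len(bp_values) < 2:
--         return None
--
--     is_rising = all(
--         bp_values[i] <= bp_values[i + 1]
--         for i in range(len(bp_values) - 1)
--     )
--
--     if is_rising: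
--         return "Progressive BP elevation - Pre-eclampsia risk increasing"
--
--     return None
-- ===== SOURCE B (Python) =====
-- def _detect_progressive_hypertension_pattern(history):
--     bp = [v.get('bp_systolic') for v in history if v.get('bp_systolic') is not None]
--     if len(bp) >= 2 and bp == sorted(bp):
--         return "Progressive BP elevation - Pre-eclampsia risk increasing"
--     return None
-- ===== Notes on version B (the rewrite author's own statement) =====
-- stated objective: alternative
-- what changed: Replaces the index-based all() scan over adjacent pairs by a sortedness test: the filtered sequence is non-decreasing iff it equals its sorted copy (bp == sorted(bp)).
import Mathlib
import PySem

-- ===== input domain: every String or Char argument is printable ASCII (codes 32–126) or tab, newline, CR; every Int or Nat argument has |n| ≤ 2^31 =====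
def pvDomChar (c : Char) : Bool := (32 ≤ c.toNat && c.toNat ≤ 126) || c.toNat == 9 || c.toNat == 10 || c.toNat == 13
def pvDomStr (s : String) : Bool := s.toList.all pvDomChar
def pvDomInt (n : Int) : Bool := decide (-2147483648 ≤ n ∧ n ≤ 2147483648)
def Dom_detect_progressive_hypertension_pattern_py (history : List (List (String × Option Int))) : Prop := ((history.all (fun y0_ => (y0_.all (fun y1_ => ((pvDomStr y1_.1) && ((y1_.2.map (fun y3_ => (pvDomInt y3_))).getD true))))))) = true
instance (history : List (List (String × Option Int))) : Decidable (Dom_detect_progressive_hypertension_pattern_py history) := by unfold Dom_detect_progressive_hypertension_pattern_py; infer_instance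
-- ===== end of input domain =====

-- B replaces A's index-based all() scan over adjacent pairs by a sortedness test:
-- the filtered bp sequence is non-decreasing iff it equals its sorted copy. Same return value.

-- ===== PORT A =====
def detect_progressive_hypertension_pattern_py (history : List (List (String × Option Int))) : Option String :=
  let bp_values : List Int :=
    history.filterMap (fun v => ((PySem.Dict.mk v).get? "bp_systolic").getD none)
  if bp_values.length < 2 then none
  else
    let is_rising := (PySem.List.pyRange 0 ((bp_values.length : Int) - 1) 1).all
      (fun i => decide (PySem.List.pyGetD bp_values i 0 ≤ PySem.List.pyGetD bp_values (i + 1) 0))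
    if is_rising then some "Progressive BP elevation - Pre-eclampsia risk increasing" else none

-- ===== PORT B =====
def detect_progressive_hypertension_pattern_py_alt (history : List (List (String × Option Int))) : Option String :=
  let bp : List Int :=
    history.filterMap (fun v => ((PySem.Dict.mk v).get? "bp_systolic").getD none)
  if 2 ≤ bp.length ∧ bp = PySem.List.sorted bp (fun x => x) false then
    some "Progressive BP elevation - Pre-eclampsia risk increasing"
  else none

-- ===== PRECONDITION & SPEC =====
def Spec_detect_progressive_hypertension_pattern_py (history : List (List (String × Option Int))) (out : Option String) : Prop := out = detect_progressive_hypertension_pattern_py_alt history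
instance (history : List (List (String × Option Int))) (out : Option String) : Decidable (Spec_detect_progressive_hypertension_pattern_py history out) := by unfold Spec_detect_progressive_hypertension_pattern_py; infer_instance

-- ===== CLAIM (what is proved, stated in full; the proofs are below) =====
def Claim_equal_detect_progressive_hypertension_pattern_py : Prop := ∀ (history : List (List (String × Option Int))), Dom_detect_progressive_hypertension_pattern_py history → Spec_detect_progressive_hypertension_pattern_py history (detect_progressive_hypertension_pattern_py history)

-- ===== LEMMAS AND PROOFS =====

-- "non-decreasing adjacent pairs", as a recursion
def pvChain : List Int → Bool
  | [] => true
  | [_] => true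
  | x :: y :: r => decide (x ≤ y) && pvChain (y :: r)

theorem pv_nat_all (bp : List Int) :
    (List.range (bp.length - 1)).all
      (fun k => decide (bp.getD k 0 ≤ bp.getD (k + 1) 0)) = pvChain bp := by
  induction bp with
  | nil => rfl
  | cons x xs ih =>
      cases xs with
      | nil => rfl
      | cons y r =>
          simp only [List.length_cons, Nat.add_sub_cancel, List.range_succ_eq_map,
            List.all_cons, List.all_map]
          rw [pvChain]
          congr 1

theorem pv_all_eq_chain (bp : List Int) :
    ((PySem.List.pyRange 0 ((bp.length : Int) - 1) 1).all
      (fun i => decide (PySem.List.pyGetD bp i 0 ≤ PySem.List.pyGetD bp (i + 1) 0)))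
      = pvChain bp := by
  rw [PySem.List.pyRange_one, ← pv_nat_all bp]
  have ht : ((bp.length : Int) - 1 - 0).toNat = bp.length - 1 := by omega
  rw [ht, List.all_map]
  congr 1
  funext k
  simp only [Function.comp_apply]
  have h1 : (0 : Int) + k = ((k : Nat) : Int) := by omega
  rw [h1, show ((k : Nat) : Int) + 1 = (((k + 1 : Nat)) : Int) by push_cast; ring,
    PySem.List.pyGetD_natCast, PySem.List.pyGetD_natCast]

theorem pv_chain_iff_chain' (bp : List Int) :
    pvChain bp = true ↔ List.IsChain (· ≤ ·) bp := by
  induction bp with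
  | nil => simp [pvChain]
  | cons x xs ih =>
      cases xs with
      | nil => simp [pvChain]
      | cons y r =>
          rw [pvChain, Bool.and_eq_true, decide_eq_true_iff, List.isChain_cons_cons]
          exact and_congr Iff.rfl ih

theorem pv_chain_iff_sorted_eq (bp : List Int) :
    pvChain bp = true ↔ bp = PySem.List.sorted bp (fun x => x) false := by
  rw [pv_chain_iff_chain', List.isChain_iff_pairwise]
  constructor
  · intro h
    exact (PySem.List.sorted_eq_self_of_pairwise bp (fun x => x) h).symm
  · intro h
    rw [h]
    exact PySem.List.sorted_pairwise bp (fun x => x)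

-- ===== VERDICT (by name: the statement is the Claim_ definition above) =====
theorem detect_progressive_hypertension_pattern_py_spec : Claim_equal_detect_progressive_hypertension_pattern_py := by
  intro history _
  unfold Spec_detect_progressive_hypertension_pattern_py
  unfold detect_progressive_hypertension_pattern_py detect_progressive_hypertension_pattern_py_alt
  set bp := history.filterMap (fun v => ((PySem.Dict.mk v).get? "bp_systolic").getD none) with hbp
  change (if bp.length < 2 then none
      else if ((PySem.List.pyRange 0 ((bp.length : Int) - 1) 1).all
          (fun i => decide (PySem.List.pyGetD bp i 0 ≤ PySem.List.pyGetD bp (i + 1) 0))) = true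
        then some "Progressive BP elevation - Pre-eclampsia risk increasing" else none)
    = (if 2 ≤ bp.length ∧ bp = PySem.List.sorted bp (fun x => x) false
        then some "Progressive BP elevation - Pre-eclampsia risk increasing" else none)
  rw [pv_all_eq_chain]
  by_cases hlen : bp.length < 2
  · rw [if_pos hlen, if_neg (fun h => by omega)]
  · rw [if_neg hlen]
    by_cases hch : pvChain bp = true
    · rw [if_pos hch, if_pos ⟨by omega, (pv_chain_iff_sorted_eq bp).mp hch⟩]
    · rw [if_neg hch, if_neg (fun h => hch ((pv_chain_iff_sorted_eq bp).mpr h.2))]
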